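-- pv_equiv track=rewrite | github.com/Akwasi-Addae/CS1 | HW4/hw4_part1.py | license
-- ===== SOURCE A (Python) =====
-- def license(password):
--     ''' Calculate score based on # of punctuations'''
--     score = alpha_count = digit_count = 0
--     password = password.lower()
--
--     for i in password:
--         if i.isalpha():                  # Condition for incrementing
--             alpha_count += 1
--
--         if i.isnumeric() and alpha_count == 3:
--             digit_count += 1
--         elif not (i.isalpha()) and not i.isnumeric():
--             digit_count = alpha_count = 0
--
--     if alpha_count == 3 and digit_count >= 4:
--         score -= 2
--
--     return score
-- ===== SOURCE B (Python) =====
-- def license(password):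
--     '''Scan from the end: trailing digit run, then alphas in the rest of the
--     final alphanumeric segment; no running reset state machine.'''
--     rev = password.lower()[::-1]
--     d = 0
--     while d < len(rev) and rev[d].isnumeric():
--         d += 1
--     a = 0
--     i = d
--     while i < len(rev) and (rev[i].isalpha() or rev[i].isnumeric()):
--         if rev[i].isalpha():
--             a += 1
--         i += 1
--     return -2 if a == 3 and d >= 4 else 0
-- ===== Notes on version B (the rewrite author's own statement) =====
-- stated objective: alternative
-- what changed: Replaces A's forward reset-state machine (alpha/digit counters cleared at every separator) by a single backward scan: count the trailing digit run, then count the alphas in the remainder of the final alphanumeric segment, and decide from those two numbers.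
import Mathlib
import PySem

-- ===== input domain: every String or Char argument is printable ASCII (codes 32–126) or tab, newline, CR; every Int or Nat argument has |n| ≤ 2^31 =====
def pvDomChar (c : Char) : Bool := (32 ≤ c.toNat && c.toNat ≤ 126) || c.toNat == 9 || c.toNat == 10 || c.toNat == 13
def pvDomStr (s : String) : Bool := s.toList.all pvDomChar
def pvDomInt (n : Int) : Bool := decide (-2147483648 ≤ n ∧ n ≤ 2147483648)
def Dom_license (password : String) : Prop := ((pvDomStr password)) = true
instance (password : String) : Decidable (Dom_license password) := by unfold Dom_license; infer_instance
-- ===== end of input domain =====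

-- B replaces A's forward reset-state machine by a single backward scan of the final
-- alphanumeric segment (trailing-digit run, then alpha count); objective: alternative.
-- (Python's str.isnumeric is ported as PySem.Chars.isdigit — identical on the ASCII domain.)

-- ===== PORT A =====
-- literal transliteration of A's loop: state (alpha_count, digit_count), reset on separators
def license (password : String) : Int :=
  let st := (PySem.Str.lower password).toList.foldl
    (fun (s : Int × Int) i =>
      let ac := if PySem.Chars.isalpha i then s.1 + 1 else s.1
      if PySem.Chars.isdigit i ∧ ac = 3 then (ac, s.2 + 1)
      else if ¬ (PySem.Chars.isalpha i) ∧ ¬ (PySem.Chars.isdigit i) then (0, 0)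
      else (ac, s.2)) (0, 0)
  if st.1 = 3 ∧ st.2 ≥ 4 then 0 - 2 else 0

-- ===== PORT B =====
-- first backward loop of Source B: count the trailing digit run, return the rest
def bDigits : List Char → Int × List Char
  | [] => (0, [])
  | c :: cs =>
    if PySem.Chars.isdigit c then
      let r := bDigits cs
      (r.1 + 1, r.2)
    else (0, c :: cs)

-- second backward loop of Source B: count alphas in the rest of the alphanumeric run
def bAlphas : List Char → Int
  | [] => 0
  | c :: cs =>
    if PySem.Chars.isalpha c then 1 + bAlphas cs
    else if PySem.Chars.isdigit c then bAlphas cs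
    else 0

def license_alt (password : String) : Int :=
  let rev := (PySem.Str.lower password).toList.reverse
  let p := bDigits rev
  let a := bAlphas p.2
  if a = 3 ∧ p.1 ≥ 4 then -2 else 0

-- ===== PRECONDITION & SPEC =====
def Spec_license (password : String) (out : Int) : Prop := out = license_alt password
instance (password : String) (out : Int) : Decidable (Spec_license password out) := by unfold Spec_license; infer_instance

-- ===== CLAIM (what is proved, stated in full; the proofs are below) =====
def Claim_equal_license : Prop := ∀ (password : String), Dom_license password → Spec_license password (license password)

-- ===== LEMMAS AND PROOFS =====

-- abbreviations for the proofs
def pvStep (s : Int × Int) (i : Char) : Int × Int :=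
  let ac := if PySem.Chars.isalpha i then s.1 + 1 else s.1
  if PySem.Chars.isdigit i ∧ ac = 3 then (ac, s.2 + 1)
  else if ¬ (PySem.Chars.isalpha i) ∧ ¬ (PySem.Chars.isdigit i) then (0, 0)
  else (ac, s.2)

def pvAlnum (c : Char) : Bool := PySem.Chars.isalpha c || PySem.Chars.isdigit c

-- alpha count of the final alphanumeric segment
def pvA (l : List Char) : Nat := ((l.reverse.takeWhile pvAlnum).filter PySem.Chars.isalpha).length
-- trailing digit run length
def pvT (l : List Char) : Nat := (l.reverse.takeWhile PySem.Chars.isdigit).length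

theorem alpha_not_digit (c : Char) (h : PySem.Chars.isalpha c = true) :
    PySem.Chars.isdigit c = false := by
  simp [PySem.Chars.isalpha, PySem.Chars.isdigit, PySem.Chars.isupper, PySem.Chars.islower,
        Char.le_def, UInt32.le_iff_toNat_le] at *
  omega

theorem fold_char (l : List Char) :
    (l.foldl pvStep (0, 0)).1 = (pvA l : Int) ∧
    ((l.foldl pvStep (0, 0)).1 < 3 → (l.foldl pvStep (0, 0)).2 = 0) ∧
    ((l.foldl pvStep (0, 0)).1 = 3 → (l.foldl pvStep (0, 0)).2 = (pvT l : Int)) := by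
  induction l using List.reverseRecOn with
  | nil => simp [pvA, pvT]
  | append_singleton l c ih =>
    obtain ⟨h1, h2, h3⟩ := ih
    rw [List.foldl_append, List.foldl_cons, List.foldl_nil]
    by_cases ha : PySem.Chars.isalpha c = true
    · have hd := alpha_not_digit c ha
      simp [pvStep, pvA, pvT, ha, hd, pvAlnum, h1]
      refine ⟨fun h => h2 ?_, fun h => h2 ?_⟩ <;> (rw [h1]; unfold pvA; omega)
    · by_cases hdg : PySem.Chars.isdigit c = true
      · simp [pvStep, pvA, pvT, ha, hdg, pvAlnum, h1]
        split_ifs with hA3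
        · refine ⟨rfl, fun h => by omega, fun _ => ?_⟩
          have hf3 : (List.foldl pvStep (0, 0) l).1 = 3 := by
            rw [h1]; unfold pvA; omega
          rw [h3 hf3]
          unfold pvT
          push_cast
          ring
        · exact ⟨rfl, fun h => h2 (by rw [h1]; unfold pvA; omega), fun h => absurd h hA3⟩
      · simp [pvStep, pvA, pvT, ha, hdg, pvAlnum]

theorem bDigits_spec (r : List Char) :
    (bDigits r).1 = ((r.takeWhile PySem.Chars.isdigit).length : Int) ∧
    (bDigits r).2 = r.dropWhile PySem.Chars.isdigit := by
  induction r with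
  | nil => simp [bDigits]
  | cons c cs ih =>
    by_cases h : PySem.Chars.isdigit c = true
    · simp [bDigits, h, ih.1, ih.2]
    · simp [bDigits, h]

theorem bAlphas_spec (r : List Char) :
    bAlphas r = (((r.takeWhile pvAlnum).filter PySem.Chars.isalpha).length : Int) := by
  induction r with
  | nil => simp [bAlphas]
  | cons c cs ih =>
    by_cases ha : PySem.Chars.isalpha c = true
    · simp [bAlphas, ha, pvAlnum, ih]
      omega
    · by_cases hd : PySem.Chars.isdigit c = true
      · simp [bAlphas, ha, hd, pvAlnum, ih]
      · simp [bAlphas, ha, hd, pvAlnum]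

-- dropping the leading digit run does not change the alpha count of the alnum prefix
theorem alpha_count_split (r : List Char) :
    ((r.takeWhile pvAlnum).filter PySem.Chars.isalpha).length =
    (((r.dropWhile PySem.Chars.isdigit).takeWhile pvAlnum).filter PySem.Chars.isalpha).length := by
  induction r with
  | nil => simp
  | cons c cs ih =>
    by_cases hd : PySem.Chars.isdigit c = true
    · have ha : PySem.Chars.isalpha c = false := by
        by_contra h
        simp at h
        have := alpha_not_digit c h
        simp [this] at hd
      simp [pvAlnum, hd, ha, ih]
    · simp [hd]

-- ===== VERDICT (by name: the statement is the Claim_ definition above) =====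
theorem license_spec : Claim_equal_license := by
  intro password _
  unfold Spec_license license license_alt
  set l := (PySem.Str.lower password).toList with hl
  obtain ⟨h1, h2, h3⟩ := fold_char l
  obtain ⟨hb1, hb2⟩ := bDigits_spec l.reverse
  have hba : bAlphas (bDigits l.reverse).2 = (pvA l : Int) := by
    rw [hb2, bAlphas_spec]
    unfold pvA
    exact_mod_cast (alpha_count_split l.reverse).symm
  show (if (List.foldl pvStep (0, 0) l).1 = 3 ∧ (List.foldl pvStep (0, 0) l).2 ≥ 4 then 0 - 2 else 0)
      = (if bAlphas (bDigits l.reverse).2 = 3 ∧ (bDigits l.reverse).1 ≥ 4 then (-2 : Int) else 0)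
  rw [hba, hb1]
  by_cases hA : (pvA l : Int) = 3
  · have := h3 (by rw [h1]; exact hA)
    rw [h1, this, hA]
    simp [pvT]
  · rw [h1]
    simp [hA]
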